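-- pv_equiv track=rewrite | github.com/mdopp/diabay | backend/core/tagger.py | extract_tags_for_display
-- ===== SOURCE A (Python) =====
-- from typing import List, Dict, Optional, Tuple
--
-- def extract_tags_for_display(tags: List[Dict]) -> Dict[str, List[str]]:
--     """
--     Group tags by category for display.
--
--     Args:
--         tags: List of tag dictionaries
--
--     Returns:
--         Dict mapping category to list of tag names
--     """
--     grouped = {}
--     for tag_info in tags:
--         category = tag_info.get('category', 'general')
--         tag_name = tag_info['tag']
--
--         if category not in grouped:
--             grouped[category] = []
--         grouped[category].append(tag_name)
--
--     return grouped
-- ===== SOURCE B (Python) =====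
-- def extract_tags_for_display(tags):
--     """
--     Group tags by category for display, as a two-phase pass: first collect the
--     distinct categories in first-seen order, then build each group with one
--     comprehension over the input.
--     """
--     categories = []
--     for tag_info in tags:
--         category = tag_info.get('category', 'general')
--         if category not in categories:
--             categories.append(category)
--     return {
--         category: [t['tag'] for t in tags
--                    if t.get('category', 'general') == category]
--         for category in categories
--     }
-- ===== Notes on version B (the rewrite author's own statement) =====
-- stated objective: alternative
-- what changed: B replaces A's element-by-element dispatch into a growing dict (membership test, empty-list insertion, in-place append per element) with a two-phase pass: one scan collecting the distinct categories in first-seen order, then a dict comprehension that builds each group by filtering the input once per category.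
import Mathlib
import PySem

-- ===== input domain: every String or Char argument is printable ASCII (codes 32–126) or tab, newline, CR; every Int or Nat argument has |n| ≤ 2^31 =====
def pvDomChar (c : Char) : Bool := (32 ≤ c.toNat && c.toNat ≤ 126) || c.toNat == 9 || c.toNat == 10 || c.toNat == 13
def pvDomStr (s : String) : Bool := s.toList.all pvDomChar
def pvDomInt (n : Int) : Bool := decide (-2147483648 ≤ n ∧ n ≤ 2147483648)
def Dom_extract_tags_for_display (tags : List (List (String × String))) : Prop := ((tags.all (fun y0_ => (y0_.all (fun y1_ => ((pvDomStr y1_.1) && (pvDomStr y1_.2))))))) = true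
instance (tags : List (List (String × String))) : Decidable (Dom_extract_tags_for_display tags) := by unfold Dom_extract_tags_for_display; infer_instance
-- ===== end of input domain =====

-- B groups tags by category in two phases (distinct categories first, then one filter per category) instead of A's per-element dispatch into a growing dict; return values agree (A's dict in first-seen key order).


-- shared helper: `t.get(k, dflt)` on an input dict (first-match lookup, exact Python dict semantics)
def pyGetStr (t : List (String × String)) (k dflt : String) : String :=
  (PySem.Dict.mk t).getD k dflt

-- ===== PORT A =====
-- `tag_info['tag']` raises KeyError when the key is missing; Pre_ excludes those inputs, the port reads "" there.
def extract_tags_for_display (tags : List (List (String × String))) : List (String × List String) :=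
  (tags.foldl
    (fun grouped tag_info =>
      let category := pyGetStr tag_info "category" "general"
      let tag_name := pyGetStr tag_info "tag" ""
      let grouped := if grouped.contains category then grouped else grouped.insert category []
      grouped.modify category [] (fun l => l ++ [tag_name]))
    PySem.Dict.empty).items

-- ===== PORT B =====
def extract_tags_for_display_alt (tags : List (List (String × String))) : List (String × List String) :=
  let categories := tags.foldl
    (fun cats tag_info => PySem.Set.add cats (pyGetStr tag_info "category" "general")) []
  categories.map (fun category =>
    (category,
     (tags.filter (fun t => pyGetStr t "category" "general" == category)).map
       (fun t => pyGetStr t "tag" "")))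

-- ===== PRECONDITION & SPEC =====
-- Pre_ excludes exactly the inputs on which Python A raises KeyError: a tag dict without a 'tag' key.
def Pre_extract_tags_for_display (tags : List (List (String × String))) : Prop :=
  ∀ t ∈ tags, "tag" ∈ t.map Prod.fst
instance (tags : List (List (String × String))) : Decidable (Pre_extract_tags_for_display tags) := by
  unfold Pre_extract_tags_for_display; infer_instance
def pvWitness_extract_tags_for_display : (List (List (String × String))) :=
  [[("tag", "linux")], [("category", "os"), ("tag", "debian")], [("tag", "cheap"), ("category", "price")]]

def Spec_extract_tags_for_display (tags : List (List (String × String))) (out : List (String × List String)) : Prop := out = extract_tags_for_display_alt tags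
instance (tags : List (List (String × String))) (out : List (String × List String)) : Decidable (Spec_extract_tags_for_display tags out) := by unfold Spec_extract_tags_for_display; infer_instance

-- ===== CLAIM (what is proved, stated in full; the proofs are below) =====
def Claim_equal_extract_tags_for_display : Prop := ∀ (tags : List (List (String × String))), Dom_extract_tags_for_display tags → Pre_extract_tags_for_display tags → Spec_extract_tags_for_display tags (extract_tags_for_display tags)

-- ===== LEMMAS AND PROOFS =====

-- A's "if missing insert []; then append" step equals a single modify-with-default step.
theorem step_eq (g : PySem.Dict String (List String)) (c : String) (n : String) :
    (if g.contains c then g else g.insert c []).modify c [] (fun l => l ++ [n])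
      = g.modify c [] (fun l => l ++ [n]) := by
  by_cases h : g.contains c = true
  · simp [h]
  · simp only [Bool.not_eq_true] at h
    have hk : c ∉ g.items.map Prod.fst := by
      intro hmem
      have : g.contains c = true := by
        rw [PySem.Dict.contains_iff_mem_keys]; simpa [PySem.Dict.keys] using hmem
      simp [h] at this
    have hfind : List.find? (fun p => p.1 == c) g.items = none := by
      rw [List.find?_eq_none]
      intro p hp
      simp only [beq_iff_eq]
      intro e; exact hk (e ▸ List.mem_map_of_mem hp)
    have hgetD : g.getD c [] = [] := PySem.Dict.getD_of_not_contains g [] h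
    have hgetD2 : (PySem.Dict.mk (g.items ++ [(c, ([] : List String))])).getD c [] = [] := by
      have : (PySem.Dict.mk (g.items ++ [(c, ([] : List String))])).get? c = some [] := by
        simp [PySem.Dict.get?, List.find?_append, hfind]
      simp [PySem.Dict.getD_eq_get?_getD, this]
    simp only [h, Bool.false_eq_true, if_false]
    simp [PySem.Dict.modify, PySem.Dict.insert, h, hgetD, hgetD2]
    conv_rhs => rw [← List.map_id g.items]
    apply List.map_congr_left
    intro p hp
    have : p.1 ≠ c := by intro e; exact hk (e ▸ List.mem_map_of_mem hp)
    simp [this]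

theorem extract_tags_for_display_spec : Claim_equal_extract_tags_for_display := by
  unfold Claim_equal_extract_tags_for_display
  intro tags _ _
  unfold Spec_extract_tags_for_display extract_tags_for_display extract_tags_for_display_alt
  -- A's fold over its growing dict is the canonical modify-with-default fold
  have hfold :
      tags.foldl
        (fun grouped tag_info =>
          let category := pyGetStr tag_info "category" "general"
          let tag_name := pyGetStr tag_info "tag" ""
          let grouped := if grouped.contains category then grouped else grouped.insert category []
          grouped.modify category [] (fun l => l ++ [tag_name]))
        PySem.Dict.empty
      = tags.foldl
          (fun d t => d.modify (pyGetStr t "category" "general") []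
            (fun l => l ++ [pyGetStr t "tag" ""]))
          PySem.Dict.empty := by
    congr 1
    funext g t
    exact step_eq g (pyGetStr t "category" "general") (pyGetStr t "tag" "")
  rw [hfold]
  set d := tags.foldl
      (fun d t => d.modify (pyGetStr t "category" "general") []
        (fun l => l ++ [pyGetStr t "tag" ""]))
      PySem.Dict.empty with hd
  have hnodup : d.keys.Nodup := by
    rw [hd]
    exact PySem.Dict.nodup_keys_foldl_modify_key tags (fun t => pyGetStr t "category" "general")
      [] (fun d t => (fun l => l ++ [pyGetStr t "tag" ""])) PySem.Dict.empty
      PySem.Dict.nodup_keys_empty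
  have hkeys : d.keys = tags.foldl
      (fun cats t => PySem.Set.add cats (pyGetStr t "category" "general")) [] := by
    rw [hd, PySem.Dict.keys_foldl_modify_key, PySem.Dict.keys_empty,
      PySem.Set.update_map_eq_foldl_add]
  have hgetD : ∀ c, d.getD c [] =
      (tags.filter (fun t => pyGetStr t "category" "general" == c)).map
        (fun t => pyGetStr t "tag" "") := by
    intro c
    have hmap : tags.foldl
        (fun d t => d.modify (pyGetStr t "category" "general") []
          (fun l => l ++ [pyGetStr t "tag" ""]))
        PySem.Dict.empty
      = (tags.map (fun t => (pyGetStr t "category" "general", pyGetStr t "tag" ""))).foldl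
          (fun d p => d.modify p.1 [] (fun l => l ++ [p.2])) PySem.Dict.empty := by
      rw [List.foldl_map]
    rw [hd, hmap, PySem.Dict.getD_foldl_modify_append]
    simp [PySem.Dict.getD_empty, List.filter_map, Function.comp_def]
  rw [PySem.Dict.items_eq_map_keys d hnodup [], hkeys]
  apply List.map_congr_left
  intro c _
  rw [hgetD c]
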